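-- pv_equiv track=rewrite | github.com/iqbalmdkaify/Code-Signals | level34.py | solution
-- ===== SOURCE A (Python) =====
-- def solution(inputArray, k):
--     n = 1
--     rm = []
--     while ((n*k)-1)<len(inputArray):
--         rm.append(inputArray[(n*k)-1])
--         n+=1
--     for i in range(len(rm)):
--         inputArray.remove(rm[i])
--
--     return inputArray
-- ===== SOURCE B (Python) =====
-- def solution(inputArray, k):
--     # Count how many occurrences of each value must be removed (the values at
--     # positions k-1, 2k-1, ... ), then one pass keeps each element unless its
--     # removal budget is still positive.  Mutates inputArray in place, like A.
--     cnt = {}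
--     if k >= 1:
--         for i in range(k - 1, len(inputArray), k):
--             v = inputArray[i]
--             cnt[v] = cnt.get(v, 0) + 1
--     out = []
--     for v in inputArray:
--         if cnt.get(v, 0) > 0:
--             cnt[v] = cnt[v] - 1
--         else:
--             out.append(v)
--     inputArray[:] = out
--     return inputArray
-- ===== Notes on version B (the rewrite author's own statement) =====
-- stated objective: alternative
-- what changed: A collects the values at indices k-1, 2k-1, ... and then calls list.remove once per collected value (a linear scan each); B counts those values in a dict and makes one pass over the list, skipping the first count[v] occurrences of each value.
import Mathlib
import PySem

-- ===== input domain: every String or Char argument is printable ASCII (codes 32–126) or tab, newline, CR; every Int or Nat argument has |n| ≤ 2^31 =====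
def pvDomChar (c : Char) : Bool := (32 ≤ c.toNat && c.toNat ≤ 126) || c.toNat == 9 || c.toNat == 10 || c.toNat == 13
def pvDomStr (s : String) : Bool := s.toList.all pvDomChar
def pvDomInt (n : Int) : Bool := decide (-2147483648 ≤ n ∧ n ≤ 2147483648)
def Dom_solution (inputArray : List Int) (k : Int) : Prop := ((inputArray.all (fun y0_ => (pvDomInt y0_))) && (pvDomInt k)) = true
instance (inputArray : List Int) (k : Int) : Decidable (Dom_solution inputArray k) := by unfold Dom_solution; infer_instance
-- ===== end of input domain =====

-- B replaces A's collect-then-repeated-remove (one list.remove scan per collected value) by a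
-- counter of the values to remove plus one pass that skips the first count[v] occurrences of each value.
-- Both A and B mutate inputArray in place to the same final value; the theorems are about the return value.

-- ===== PORT A =====
-- while ((n*k)-1) < len(inputArray): rm.append(inputArray[(n*k)-1]); n += 1
-- (fuel = len+1 only makes the recursion total; for k ≥ 1 it is never exhausted)
def solBuildRm (xs : List Int) (k : Int) : Nat → Int → List Int → List Int
  | 0, _, rm => rm
  | fuel+1, n, rm =>
    if n * k - 1 < (xs.length : Int) then
      solBuildRm xs k fuel (n + 1) (rm ++ [PySem.List.pyGetD xs (n * k - 1) 0])
    else rm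

def solution (inputArray : List Int) (k : Int) : List Int :=
  let rm := solBuildRm inputArray k (inputArray.length + 1) 1 []
  rm.foldl (fun acc v => (PySem.List.remove? acc v).getD acc) inputArray

-- ===== PORT B =====
def solution_alt (inputArray : List Int) (k : Int) : List Int :=
  let cnt : PySem.Dict Int Int :=
    if 1 ≤ k then
      (PySem.List.pyRange (k - 1) (inputArray.length : Int) k).foldl
        (fun d i => d.insert (PySem.List.pyGetD inputArray i 0)
                             (d.getD (PySem.List.pyGetD inputArray i 0) 0 + 1))
        PySem.Dict.empty
    else PySem.Dict.empty
  let p := inputArray.foldl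
    (fun (p : List Int × PySem.Dict Int Int) v =>
      if p.2.getD v 0 > 0 then (p.1, p.2.insert v (p.2.getD v 0 - 1))
      else (p.1 ++ [v], p.2)) ([], cnt)
  p.1

-- ===== PRECONDITION & SPEC =====
-- Pre_ excludes exactly k ≤ 0, where Python A never returns: it raises IndexError
-- (k < 0, or k = 0 on the empty list) or loops forever (k = 0 on a nonempty list).
def Pre_solution (inputArray : List Int) (k : Int) : Prop := 1 ≤ k
instance (inputArray : List Int) (k : Int) : Decidable (Pre_solution inputArray k) := by unfold Pre_solution; infer_instance

def pvWitness_solution : List Int × Int := ([1, 2, 1, 2, 3], 2)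

def Spec_solution (inputArray : List Int) (k : Int) (out : List Int) : Prop := out = solution_alt inputArray k
instance (inputArray : List Int) (k : Int) (out : List Int) : Decidable (Spec_solution inputArray k out) := by unfold Spec_solution; infer_instance

-- ===== CLAIM (what is proved, stated in full; the proofs are below) =====
def Claim_equal_solution : Prop := ∀ (inputArray : List Int) (k : Int), Dom_solution inputArray k → Pre_solution inputArray k → Spec_solution inputArray k (solution inputArray k)

-- ===== LEMMAS AND PROOFS =====

-- pyRange with a positive step, in induction form
theorem pyRange_pos_nil (a b s : Int) (hs : 0 < s) (hab : b ≤ a) :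
    PySem.List.pyRange a b s = [] := by
  rw [PySem.List.pyRange_of_pos a b hs, if_neg (by omega)]
  simp

theorem pyRange_pos_cons (a b s : Int) (hs : 0 < s) (hab : a < b) :
    PySem.List.pyRange a b s = a :: PySem.List.pyRange (a + s) b s := by
  rw [PySem.List.pyRange_of_pos a b hs, PySem.List.pyRange_of_pos (a + s) b hs,
      if_pos hab]
  have hcnt : ((b - a + s - 1) / s).toNat
      = (if a + s < b then ((b - (a + s) + s - 1) / s).toNat else 0) + 1 := by
    by_cases h : a + s < b
    · rw [if_pos h]
      have h1 : b - a + s - 1 = (b - (a + s) + s - 1) + 1 * s := by ring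
      rw [h1, Int.add_mul_ediv_right _ _ (by omega)]
      have h2 : 0 ≤ (b - (a + s) + s - 1) / s := Int.ediv_nonneg (by omega) (by omega)
      omega
    · rw [if_neg h]
      have h1 : b - a + s - 1 = (b - a - 1) + 1 * s := by ring
      rw [h1, Int.add_mul_ediv_right _ _ (by omega)]
      have h2 : (b - a - 1) / s = 0 := Int.ediv_eq_zero_of_lt (by omega) (by omega)
      omega
  rw [hcnt, List.range_succ_eq_map]
  simp only [List.map_cons, List.map_map]
  congr 1
  · simp
  · apply List.map_congr_left
    intro x _
    simp only [Function.comp]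
    push_cast
    ring

-- A's while loop produces exactly the values at indices k-1, 2k-1, …
theorem solBuildRm_eq (xs : List Int) (k : Int) (hk : 1 ≤ k) :
    ∀ (fuel : Nat) (n : Int), 1 ≤ n → (xs.length : Int) - (n * k - 1) ≤ (fuel : Int) →
    ∀ rm, solBuildRm xs k fuel n rm
      = rm ++ (PySem.List.pyRange (n * k - 1) (xs.length : Int) k).map
          (fun i => PySem.List.pyGetD xs i 0) := by
  intro fuel
  induction fuel with
  | zero =>
    intro n _ hfuel rm
    rw [solBuildRm, pyRange_pos_nil _ _ _ (by omega) (by omega)]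
    simp
  | succ f ih =>
    intro n hn hfuel rm
    rw [solBuildRm]
    by_cases h : n * k - 1 < (xs.length : Int)
    · rw [if_pos h]
      have hstep : (n + 1) * k = n * k + k := by ring
      rw [ih (n + 1) (by omega) (by omega)]
      rw [pyRange_pos_cons _ _ _ (by omega) h]
      have harg : n * k - 1 + k = (n + 1) * k - 1 := by ring
      rw [harg]
      simp
    · rw [if_neg h, pyRange_pos_nil _ _ _ (by omega) (by omega)]
      simp

-- the mapped range is a sublist of xs (indices are increasing and in range)
theorem mapRange_sublist (xs : List Int) (k : Int) (hk : 1 ≤ k) :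
    ∀ (n : Nat) (i : Int), 0 ≤ i → (xs.length : Int) - i ≤ (n : Int) →
    ((PySem.List.pyRange i (xs.length : Int) k).map
        (fun j => PySem.List.pyGetD xs j 0)).Sublist (xs.drop i.toNat) := by
  intro n
  induction n with
  | zero =>
    intro i hi hn
    rw [pyRange_pos_nil _ _ _ (by omega) (by omega)]
    simp
  | succ m ih =>
    intro i hi hn
    by_cases h : i < (xs.length : Int)
    · rw [pyRange_pos_cons _ _ _ (by omega) h]
      have hlt : i.toNat < xs.length := by omega
      rw [List.map_cons, List.drop_eq_getElem_cons hlt,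
          PySem.List.pyGetD_eq_getElem xs 0 hi h]
      apply List.Sublist.cons₂
      have h1 := ih (i + k) (by omega) (by omega)
      have h2 : xs.drop (i + k).toNat = (xs.drop (i.toNat + 1)).drop ((i + k).toNat - (i.toNat + 1)) := by
        rw [List.drop_drop]
        congr 1
        omega
      rw [h2] at h1
      exact h1.trans (List.drop_sublist _ _)
    · rw [pyRange_pos_nil _ _ _ (by omega) (by omega)]
      simp

-- one-pass skipper with a removal budget per value
def skipCnt (c : Int → Int) : List Int → List Int
  | [] => []
  | x :: t => if 0 < c x then skipCnt (fun v => if v = x then c v - 1 else c v) t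
              else x :: skipCnt c t

theorem skipCnt_of_nonpos (c : Int → Int) (hc : ∀ v, c v ≤ 0) :
    ∀ xs, skipCnt c xs = xs := by
  intro xs
  induction xs with
  | nil => rfl
  | cons x t ih => rw [skipCnt, if_neg (by have := hc x; omega), ih]

theorem sublist_erase (r : Int) (rm xs : List Int) (h : (r :: rm).Sublist xs) :
    rm.Sublist (xs.erase r) := by
  induction xs generalizing rm with
  | nil => cases h
  | cons x t ih =>
    rcases List.cons_sublist_cons'.mp h with h' | ⟨hx, h'⟩
    · by_cases hxr : x = r
      · subst hxr
        rw [List.erase_cons_head]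
        exact ((List.sublist_cons_self x rm).trans h')
      · rw [List.erase_cons_tail (by simpa using hxr)]
        exact (ih rm h').cons x
    · rw [← hx, List.erase_cons_head]
      exact h'

theorem skipCnt_bump (r : Int) :
    ∀ (xs : List Int) (c : Int → Int), (∀ v, 0 ≤ c v) → r ∈ xs →
    skipCnt (fun v => if v = r then c v + 1 else c v) xs = skipCnt c (xs.erase r) := by
  intro xs
  induction xs with
  | nil => intro c _ hr; cases hr
  | cons x t ih =>
    intro c hc hr
    by_cases hxr : x = r
    · subst hxr
      rw [List.erase_cons_head, skipCnt, if_pos (by have := hc x; simp; omega)]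
      congr 1
      funext v
      by_cases hv : v = x <;> simp [hv]
    · have hrt : r ∈ t := by
        rcases hr with _ | h
        · exact absurd rfl hxr
        · assumption
      rw [List.erase_cons_tail (by simpa using hxr), skipCnt, skipCnt]
      have hcx : (if x = r then c x + 1 else c x) = c x := by rw [if_neg hxr]
      rw [hcx]
      by_cases hpos : 0 < c x
      · rw [if_pos hpos, if_pos hpos]
        have hfe : (fun v => if v = x then (if v = r then c v + 1 else c v) - 1
                              else (if v = r then c v + 1 else c v))
            = (fun v => if v = r then (fun w => if w = x then c w - 1 else c w) v + 1
                        else (fun w => if w = x then c w - 1 else c w) v) := by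
          funext v
          by_cases hvx : v = x <;> by_cases hvr : v = r <;>
            simp [hvx, hvr] <;> omega
        rw [hfe, ih (fun w => if w = x then c w - 1 else c w)
              (by intro v; by_cases hv : v = x <;> simp [hv] <;> [omega; exact hc v]) hrt]
      · rw [if_neg hpos, if_neg hpos, ih c hc hrt]

-- A's repeated list.remove equals the one-pass skip with the multiset of removals
theorem foldl_remove_eq_skipCnt :
    ∀ (rm xs : List Int), rm.Sublist xs →
    rm.foldl (fun acc v => (PySem.List.remove? acc v).getD acc) xs
      = skipCnt (fun v => (rm.count v : Int)) xs := by
  intro rm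
  induction rm with
  | nil =>
    intro xs _
    rw [List.foldl_nil, skipCnt_of_nonpos _ (by intro v; simp)]
  | cons r rm' ih =>
    intro xs h
    have hr : r ∈ xs := h.subset (List.mem_cons_self)
    rw [List.foldl_cons, PySem.List.remove?_eq_some_erase xs r hr, Option.getD_some,
        ih (xs.erase r) (sublist_erase r rm' xs h)]
    have hfe : (fun v => ((r :: rm').count v : Int))
        = (fun v => if v = r then ((rm'.count v : Int)) + 1 else ((rm'.count v : Int))) := by
      funext v
      by_cases hv : v = r
      · subst hv
        rw [if_pos rfl, List.count_cons_self]
        push_cast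
        ring
      · have hrv : ¬ r = v := fun h => hv h.symm
        rw [if_neg hv]
        simp [hrv]
    rw [hfe, skipCnt_bump r xs (fun v => ((rm'.count v : Int))) (by intro v; positivity) hr]

-- B's second pass equals the one-pass skip with the dict's budgets
theorem foldl_pass_eq_skipCnt :
    ∀ (xs out : List Int) (d : PySem.Dict Int Int),
    (xs.foldl (fun (p : List Int × PySem.Dict Int Int) v =>
        if p.2.getD v 0 > 0 then (p.1, p.2.insert v (p.2.getD v 0 - 1))
        else (p.1 ++ [v], p.2)) (out, d)).1
      = out ++ skipCnt (fun v => d.getD v 0) xs := by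
  intro xs
  induction xs with
  | nil => intro out d; simp [skipCnt]
  | cons x t ih =>
    intro out d
    rw [List.foldl_cons, skipCnt]
    by_cases h : 0 < d.getD x 0
    · rw [if_pos (by simpa using h), if_pos h]
      simp only
      rw [ih]
      have hfe : (fun v => (d.insert x (d.getD x 0 - 1)).getD v 0)
          = (fun v => if v = x then d.getD v 0 - 1 else d.getD v 0) := by
        funext v
        rw [PySem.Dict.getD_insert]
        by_cases hv : v = x <;> simp [hv]
      rw [hfe]
    · rw [if_neg (by simpa using h), if_neg h]
      simp only
      rw [ih]
      simp

theorem foldl_insert_map_eq_counter (l : List Int) (f : Int → Int) :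
    l.foldl (fun d i => d.insert (f i) (d.getD (f i) 0 + 1)) PySem.Dict.empty
      = PySem.Dict.counter (l.map f) := by
  rw [← PySem.Dict.foldl_insert_getD_add_one_eq_counter, List.foldl_map]

theorem solution_eq (inputArray : List Int) (k : Int) (hk : 1 ≤ k) :
    solution inputArray k = solution_alt inputArray k := by
  have hrm : solBuildRm inputArray k (inputArray.length + 1) 1 []
      = (PySem.List.pyRange (k - 1) (inputArray.length : Int) k).map
          (fun i => PySem.List.pyGetD inputArray i 0) := by
    have h := solBuildRm_eq inputArray k hk (inputArray.length + 1) 1 (by omega)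
      (by push_cast; omega) []
    have h1 : (1 : Int) * k - 1 = k - 1 := by ring
    rw [h1] at h
    simpa using h
  set vals := (PySem.List.pyRange (k - 1) (inputArray.length : Int) k).map
      (fun i => PySem.List.pyGetD inputArray i 0) with hvals
  have hsub : vals.Sublist inputArray := by
    have h := mapRange_sublist inputArray k hk inputArray.length (k - 1) (by omega)
      (by omega)
    exact h.trans (List.drop_sublist _ _)
  simp only [solution, solution_alt]
  rw [hrm, foldl_remove_eq_skipCnt vals inputArray hsub, if_pos hk]
  have hcnt : (PySem.List.pyRange (k - 1) (inputArray.length : Int) k).foldl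
      (fun d i => d.insert (PySem.List.pyGetD inputArray i 0)
                           (d.getD (PySem.List.pyGetD inputArray i 0) 0 + 1))
      PySem.Dict.empty = PySem.Dict.counter vals := by
    rw [hvals]
    exact foldl_insert_map_eq_counter _ _
  rw [hcnt, foldl_pass_eq_skipCnt]
  have hfe : (fun v => (PySem.Dict.counter vals).getD v 0)
      = (fun v => ((vals.count v : Int))) := by
    funext v
    exact PySem.Dict.getD_counter vals v
  rw [hfe, List.nil_append]

-- ===== VERDICT (by name: the statement is the Claim_ definition above) =====
theorem solution_spec : Claim_equal_solution := by
  intro inputArray k _ hpre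
  unfold Spec_solution
  exact solution_eq inputArray k hpre
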